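-- pv_equiv track=rewrite | github.com/lrlip/Festo-Code-Challenge-2023 | utils/keyforger.py | string_E_needs_an_F
-- ===== SOURCE A (Python) =====
-- def string_E_needs_an_F(key):
--     """in a key, an E can only exist when it it has a F as prefix
--     replace all FE with C if allowed
--
--     Args:
--         key (str): keystring
--
--     Returns:
--         key: _description_
--     """
--     res_E = [i for i in range(len(key)) if key.startswith('E', i)]
--     res_FE = [i for i in range(len(key)) if key.startswith('FE', i)]
--
--     if len(res_E) == len(res_FE):
--         key = key.replace('FE', 'C')
--         return key
--     else:
--         return None
-- ===== SOURCE B (Python) =====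
-- def string_E_needs_an_F(key):
--     """in a key, an E can only exist when it it has a F as prefix
--     replace all FE with C if allowed
--
--     Single pass: walk the string once, emitting 'C' for each 'FE' pair and
--     copying other characters; bail out with None the moment an 'E' appears
--     that is not consumed as part of an 'FE' pair.
--     """
--     out = []
--     i = 0
--     n = len(key)
--     while i < n:
--         c = key[i]
--         if c == 'F' and i + 1 < n and key[i + 1] == 'E':
--             out.append('C')
--             i += 2
--         elif c == 'E':
--             return None
--         else:
--             out.append(c)
--             i += 1
--     return ''.join(out)
-- ===== Notes on version B (the rewrite author's own statement) =====
-- stated objective: simpler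
-- what changed: Instead of building two index lists (all positions of E and of FE pairs) and comparing their lengths before a separate replace pass, B makes one pass that validates and builds the replaced string simultaneously, returning None as soon as it meets an E not preceded by F.
import Mathlib
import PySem

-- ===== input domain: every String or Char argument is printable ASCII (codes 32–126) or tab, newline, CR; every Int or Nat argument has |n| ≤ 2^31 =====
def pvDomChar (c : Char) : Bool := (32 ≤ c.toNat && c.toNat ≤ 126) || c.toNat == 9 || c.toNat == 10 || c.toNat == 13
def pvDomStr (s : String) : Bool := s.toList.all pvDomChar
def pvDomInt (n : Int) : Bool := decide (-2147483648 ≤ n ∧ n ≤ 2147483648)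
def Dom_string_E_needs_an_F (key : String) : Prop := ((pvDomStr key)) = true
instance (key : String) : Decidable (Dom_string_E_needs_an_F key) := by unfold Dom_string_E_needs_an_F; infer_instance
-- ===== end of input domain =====

-- B replaces A's two index-list builds + length comparison + separate replace pass
-- with one pass that validates and builds the replaced string simultaneously (objective: simpler).


-- ===== PORT A =====
-- key.startswith(p, i) with 0 ≤ i is ported as PySem.Chars.startswith on (toList.drop i): exact for nonnegative start.
def string_E_needs_an_F (key : String) : Option String :=
  let cs := key.toList
  let res_E := (PySem.List.pyRange 0 (cs.length : Int) 1).filter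
    (fun i => PySem.Chars.startswith (cs.drop i.toNat) ['E'])
  let res_FE := (PySem.List.pyRange 0 (cs.length : Int) 1).filter
    (fun i => PySem.Chars.startswith (cs.drop i.toNat) ['F', 'E'])
  if res_E.length = res_FE.length then some (PySem.Str.replace key "FE" "C") else none

-- ===== PORT B =====
-- one pass: emit 'C' for an 'FE' pair (advance by 2), fail on a bare 'E', copy otherwise
def altGo : List Char → Option (List Char)
  | [] => some []
  | c :: t =>
    if c = 'F' ∧ t.head? = some 'E' then (altGo t.tail).map (fun r => 'C' :: r)
    else if c = 'E' then none
    else (altGo t).map (fun r => c :: r)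
termination_by cs => cs.length
decreasing_by
  · simp only [List.length_cons, List.length_tail]; omega
  · simp

def string_E_needs_an_F_alt (key : String) : Option String :=
  (altGo key.toList).map String.ofList

-- ===== PRECONDITION & SPEC =====
def Spec_string_E_needs_an_F (key : String) (out : Option String) : Prop := out = string_E_needs_an_F_alt key
instance (key : String) (out : Option String) : Decidable (Spec_string_E_needs_an_F key out) := by unfold Spec_string_E_needs_an_F; infer_instance

-- ===== CLAIM (what is proved, stated in full; the proofs are below) =====
def Claim_equal_string_E_needs_an_F : Prop := ∀ (key : String), Dom_string_E_needs_an_F key → Spec_string_E_needs_an_F key (string_E_needs_an_F key)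

-- ===== LEMMAS AND PROOFS =====

-- number of indices holding 'E' / starting an "FE" pair, recursively
def eCnt : List Char → Nat
  | [] => 0
  | c :: t => (if c = 'E' then 1 else 0) + eCnt t

def feCnt : List Char → Nat
  | [] => 0
  | c :: t => (if c = 'F' ∧ t.head? = some 'E' then 1 else 0) + feCnt t

-- the pure result of key.replace("FE","C")
def rep : List Char → List Char
  | [] => []
  | c :: t => if c = 'F' ∧ t.head? = some 'E' then 'C' :: rep t.tail else c :: rep t
termination_by cs => cs.length
decreasing_by
  · simp only [List.length_cons, List.length_tail]; omega
  · simp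

lemma countP_range_drop_cons (p : List Char → Bool) (c : Char) (t : List Char) :
    (List.range (c :: t).length).countP (fun k => p ((c :: t).drop k))
      = (if p (c :: t) then 1 else 0)
        + (List.range t.length).countP (fun k => p (t.drop k)) := by
  simp only [List.length_cons, List.range_succ_eq_map, List.countP_cons, List.countP_map]
  simp [Function.comp_def, Nat.add_comm]

lemma resE_len (cs : List Char) :
    ((PySem.List.pyRange 0 (cs.length : Int) 1).filter
      (fun i => PySem.Chars.startswith (cs.drop i.toNat) ['E'])).length = eCnt cs := by
  rw [PySem.List.pyRange_one]
  simp only [Int.sub_zero, Int.toNat_natCast, List.filter_map, List.length_map,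
    Function.comp_def, ← List.countP_eq_length_filter]
  have : ∀ k : Nat, ((0 : Int) + (k : Int)).toNat = k := by intro k; omega
  simp only [this]
  induction cs with
  | nil => simp [eCnt]
  | cons c t ih =>
    rw [show (fun k => PySem.Chars.startswith (List.drop k (c :: t)) ['E'])
          = (fun k => (fun l => PySem.Chars.startswith l ['E']) ((c :: t).drop k)) from rfl,
       countP_range_drop_cons (fun l => PySem.Chars.startswith l ['E']) c t]
    rw [ih, eCnt]
    congr 1
    by_cases h : c = 'E'
    · subst h
      simp [show PySem.Chars.startswith ('E' :: t) ['E'] = true from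
        (PySem.Chars.startswith_iff _ _).2 ⟨t, rfl⟩]
    · have : ¬ (['E'] <+: c :: t) := by
        rintro ⟨u, hu⟩; simp at hu; exact h hu.1.symm
      simp only [show PySem.Chars.startswith (c :: t) ['E'] = false by
        cases hb : PySem.Chars.startswith (c :: t) ['E']
        · rfl
        · exact absurd ((PySem.Chars.startswith_iff _ _).1 hb) this]
      simp [h]

lemma prefix_FE_iff (c : Char) (t : List Char) :
    (['F', 'E'] <+: c :: t) ↔ (c = 'F' ∧ t.head? = some 'E') := by
  constructor
  · rintro ⟨u, hu⟩
    cases t with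
    | nil => simp at hu
    | cons d t' =>
      simp only [List.cons_append, List.cons.injEq] at hu
      obtain ⟨h1, h2, _⟩ := hu
      exact ⟨h1.symm, by simp [h2.symm]⟩
  · rintro ⟨hc, hh⟩
    cases t with
    | nil => simp at hh
    | cons d t' =>
      simp only [List.head?_cons, Option.some.injEq] at hh
      exact ⟨t', by simp [hc, hh]⟩

lemma resFE_len (cs : List Char) :
    ((PySem.List.pyRange 0 (cs.length : Int) 1).filter
      (fun i => PySem.Chars.startswith (cs.drop i.toNat) ['F', 'E'])).length = feCnt cs := by
  rw [PySem.List.pyRange_one]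
  simp only [Int.sub_zero, Int.toNat_natCast, List.filter_map, List.length_map,
    Function.comp_def, ← List.countP_eq_length_filter]
  have : ∀ k : Nat, ((0 : Int) + (k : Int)).toNat = k := by intro k; omega
  simp only [this]
  induction cs with
  | nil => simp [feCnt]
  | cons c t ih =>
    rw [show (fun k => PySem.Chars.startswith (List.drop k (c :: t)) ['F', 'E'])
          = (fun k => (fun l => PySem.Chars.startswith l ['F', 'E']) ((c :: t).drop k)) from rfl,
       countP_range_drop_cons (fun l => PySem.Chars.startswith l ['F', 'E']) c t]
    rw [ih, feCnt]
    congr 1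
    by_cases h : c = 'F' ∧ t.head? = some 'E'
    · simp only [show PySem.Chars.startswith (c :: t) ['F', 'E'] = true from
        (PySem.Chars.startswith_iff _ _).2 ((prefix_FE_iff c t).2 h)]
      simp [h]
    · simp only [show PySem.Chars.startswith (c :: t) ['F', 'E'] = false by
        cases hb : PySem.Chars.startswith (c :: t) ['F', 'E']
        · rfl
        · exact absurd ((prefix_FE_iff c t).1 ((PySem.Chars.startswith_iff _ _).1 hb)) h]
      simp [h]

lemma fe_le (cs : List Char) :
    feCnt cs + (if cs.head? = some 'E' then 1 else 0) ≤ eCnt cs := by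
  induction cs with
  | nil => simp [feCnt, eCnt]
  | cons c t ih =>
    rw [feCnt, eCnt]
    by_cases ht : t.head? = some 'E'
    · rw [if_pos ht] at ih
      by_cases hc : c = 'E'
      · have hA : ¬(c = 'F' ∧ t.head? = some 'E') := by
          rintro ⟨h, -⟩; rw [hc] at h; exact absurd h (by decide)
        rw [if_neg hA, if_pos (show (c :: t).head? = some 'E' by simp [hc]), if_pos hc]
        omega
      · have hHn : ¬((c :: t).head? = some 'E') := by simp [hc]
        by_cases hf : c = 'F'
        · rw [if_pos ⟨hf, ht⟩, if_neg hHn, if_neg hc]; omega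
        · have hA : ¬(c = 'F' ∧ t.head? = some 'E') := by rintro ⟨h, -⟩; exact hf h
          rw [if_neg hA, if_neg hHn, if_neg hc]; omega
    · rw [if_neg ht] at ih
      have hA : ¬(c = 'F' ∧ t.head? = some 'E') := by rintro ⟨-, h⟩; exact ht h
      by_cases hc : c = 'E'
      · rw [if_neg hA, if_pos (show (c :: t).head? = some 'E' by simp [hc]), if_pos hc]
        omega
      · rw [if_neg hA, if_neg (show ¬((c :: t).head? = some 'E') by simp [hc]), if_neg hc]
        omega

lemma altGo_eq (cs : List Char) :
    altGo cs = if eCnt cs = feCnt cs then some (rep cs) else none := by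
  induction cs using altGo.induct with
  | case1 => simp [altGo, eCnt, feCnt, rep]
  | case2 c t h ih =>
    obtain ⟨hc, hh⟩ := h
    cases t with
    | nil => simp at hh
    | cons d t' =>
      simp only [List.head?_cons, Option.some.injEq] at hh
      subst hc; subst hh
      have e1 : altGo ('F' :: 'E' :: t') = (altGo t').map (fun r => 'C' :: r) := by
        rw [altGo]; simp
      have e2 : rep ('F' :: 'E' :: t') = 'C' :: rep t' := by
        rw [rep]; simp
      have he : eCnt ('F' :: 'E' :: t') = 1 + eCnt t' := by
        rw [eCnt, eCnt]; simp
      have hf : feCnt ('F' :: 'E' :: t') = 1 + feCnt t' := by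
        rw [feCnt, feCnt]; simp
      simp only [List.tail_cons] at ih
      rw [e1, e2, he, hf, ih]
      by_cases h : eCnt t' = feCnt t'
      · rw [if_pos h, if_pos (by omega)]; rfl
      · rw [if_neg h, if_neg (by omega)]; rfl
  | case3 t h =>
    have e1 : altGo ('E' :: t) = none := by rw [altGo]; simp
    have hle := fe_le t
    have hne : ¬ (eCnt ('E' :: t) = feCnt ('E' :: t)) := by
      rw [eCnt, feCnt]; simp; omega
    rw [e1, if_neg hne]
  | case4 c t h1 h2 ih =>
    rw [altGo, if_neg h1, if_neg h2, rep, if_neg h1, ih]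
    have he : eCnt (c :: t) = eCnt t := by rw [eCnt, if_neg h2]; omega
    have hf : feCnt (c :: t) = feCnt t := by rw [feCnt, if_neg h1]; omega
    rw [he, hf]
    by_cases h : eCnt t = feCnt t
    · rw [if_pos h, if_pos h]; rfl
    · rw [if_neg h, if_neg h]; rfl

lemma replace_go_eq : ∀ (fuel : Nat) (l acc : List Char), l.length ≤ fuel →
    PySem.Chars.replace.go ['F', 'E'] ['C'] fuel l acc = acc.reverse ++ rep l := by
  intro fuel
  induction fuel with
  | zero =>
    intro l acc h
    have : l = [] := by cases l <;> simp_all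
    subst this
    simp [PySem.Chars.replace.go, rep]
  | succ n ih =>
    intro l acc h
    cases l with
    | nil => simp [PySem.Chars.replace.go, rep]
    | cons c t =>
      rw [PySem.Chars.replace.go]
      by_cases hp : ['F', 'E'] <+: c :: t
      · have hb : List.isPrefixOf ['F', 'E'] (c :: t) = true := by
          rw [List.isPrefixOf_iff_prefix]; exact hp
        obtain ⟨hc, hh⟩ := (prefix_FE_iff c t).1 hp
        cases t with
        | nil => simp at hh
        | cons d t' =>
          simp only [List.head?_cons, Option.some.injEq] at hh
          subst hc; subst hh
          simp only [hb, if_true]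
          rw [show List.drop ['F', 'E'].length ('F' :: 'E' :: t') = t' from rfl,
              show (['C'] : List Char).reverse ++ acc = 'C' :: acc from rfl]
          rw [ih t' ('C' :: acc) (by simp at h ⊢; omega)]
          have e2 : rep ('F' :: 'E' :: t') = 'C' :: rep t' := by rw [rep]; simp
          rw [e2]
          simp
      · have hb : List.isPrefixOf ['F', 'E'] (c :: t) = false := by
          cases hx : List.isPrefixOf ['F', 'E'] (c :: t)
          · rfl
          · exact absurd (List.isPrefixOf_iff_prefix.1 hx) hp
        simp only [hb, Bool.false_eq_true, if_false]
        rw [ih t (c :: acc) (by simp at h ⊢; omega)]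
        rw [rep, if_neg (fun hcc => hp ((prefix_FE_iff c t).2 hcc))]
        simp

lemma replace_eq (cs : List Char) :
    PySem.Chars.replace cs ['F', 'E'] ['C'] = rep cs := by
  rw [PySem.Chars.replace]
  simp only [List.isEmpty_cons, Bool.false_eq_true, if_false]
  exact replace_go_eq cs.length cs [] le_rfl

-- ===== VERDICT (by name: the statement is the Claim_ definition above) =====
theorem string_E_needs_an_F_spec : Claim_equal_string_E_needs_an_F := by
  intro key _
  unfold Spec_string_E_needs_an_F string_E_needs_an_F string_E_needs_an_F_alt
  simp only [resE_len, resFE_len, altGo_eq key.toList]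
  by_cases h : eCnt key.toList = feCnt key.toList
  · rw [if_pos h, if_pos h, Option.map_some, Option.some.injEq, PySem.Str.replace]
    congr 1
    rw [show ("FE" : String).toList = ['F', 'E'] by decide,
        show ("C" : String).toList = ['C'] by decide]
    exact replace_eq key.toList
  · rw [if_neg h, if_neg h]; rfl
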